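-- pv_equiv track=rewrite | github.com/JmeiDing/RETO | RL_LLM/rl4lms/envs/text_generation/metric.py | paser_aspn_to_dict
-- ===== SOURCE A (Python) =====
-- def paser_aspn_to_dict(sent, all_domain, all_acts):
--     sent = sent.split()
--     dialog_act = {}
--     domain_idx = [idx for idx,token in enumerate(sent) if token in all_domain+["[general]"]]
--     for i,d_idx in enumerate(domain_idx):
--         next_d_idx = len(sent) if i+1 == len(domain_idx) else domain_idx[i+1]
--         domain = sent[d_idx]
--         if domain in dialog_act:
--             domain_da = dialog_act[domain]
--         else:
--             domain_da = {}
--         sub_span = sent[d_idx+1:next_d_idx]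
--         sub_a_idx = [idx for idx,token in enumerate(sub_span) if token in all_acts]
--         for j,a_idx in enumerate(sub_a_idx):
--             next_a_idx = len(sub_span) if j+1 == len(sub_a_idx) else sub_a_idx[j+1]
--             act = sub_span[a_idx]
--             act_slots = sub_span[a_idx+1:next_a_idx]
--             domain_da[act] = act_slots
--         dialog_act[domain] = domain_da
--     return dialog_act
-- ===== SOURCE B (Python) =====
-- def paser_aspn_to_dict(sent, all_domain, all_acts):
--     dialog_act = {}
--     cur_domain = None
--     cur_act = None
--     for token in sent.split():
--         if token in all_domain or token == "[general]":
--             dialog_act.setdefault(token, {})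
--             cur_domain, cur_act = token, None
--         elif cur_domain is not None and token in all_acts:
--             dialog_act[cur_domain][token] = []
--             cur_act = token
--         elif cur_act is not None:
--             dialog_act[cur_domain][cur_act].append(token)
--     return dialog_act
-- ===== Notes on version B (the rewrite author's own statement) =====
-- stated objective: simpler
-- what changed: Replaced the index-list-plus-slicing two-level segmentation with a single stateful left-to-right pass over the tokens that tracks the current domain and current act and appends slots incrementally.
import Mathlib
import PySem

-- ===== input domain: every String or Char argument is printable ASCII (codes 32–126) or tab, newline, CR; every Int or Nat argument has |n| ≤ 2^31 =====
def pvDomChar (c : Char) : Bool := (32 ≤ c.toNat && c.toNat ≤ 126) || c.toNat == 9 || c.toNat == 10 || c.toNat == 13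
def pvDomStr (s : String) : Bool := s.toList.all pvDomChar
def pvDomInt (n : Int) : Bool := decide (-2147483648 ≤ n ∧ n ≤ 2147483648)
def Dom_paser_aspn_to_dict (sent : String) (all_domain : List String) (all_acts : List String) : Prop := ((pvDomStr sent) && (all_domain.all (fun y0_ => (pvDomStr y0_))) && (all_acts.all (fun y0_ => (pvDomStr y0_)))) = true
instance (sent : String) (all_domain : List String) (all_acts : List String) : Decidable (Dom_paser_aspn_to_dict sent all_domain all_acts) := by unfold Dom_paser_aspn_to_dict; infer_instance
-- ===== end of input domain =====

-- B replaces A's index-list-plus-slicing segmentation with a single stateful pass over the tokens (objective: simpler).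

-- ===== PORT A =====
def paser_aspn_to_dict (sent : String) (all_domain : List String) (all_acts : List String) : List (String × List (String × List String)) :=
  let ts := PySem.Str.split₀ sent
  let domain_idx := ((PySem.List.enumerate ts).filter (fun p => (all_domain ++ ["[general]"]).contains p.2)).map (fun p => p.1)
  let dialog_act := (PySem.List.enumerate domain_idx).foldl
    (fun (dialog_act : PySem.Dict String (PySem.Dict String (List String))) p =>
      let next_d_idx : Int := if p.1 + 1 == (domain_idx.length : Int) then (ts.length : Int) else PySem.List.pyGetD domain_idx (p.1 + 1) 0
      let domain := PySem.List.pyGetD ts p.2 ""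
      let domain_da := dialog_act.getD domain PySem.Dict.empty
      let sub_span := PySem.List.slice ts (some (p.2 + 1)) (some next_d_idx)
      let sub_a_idx := ((PySem.List.enumerate sub_span).filter (fun q => all_acts.contains q.2)).map (fun q => q.1)
      let domain_da' := (PySem.List.enumerate sub_a_idx).foldl
        (fun (dd : PySem.Dict String (List String)) q =>
          let next_a_idx : Int := if q.1 + 1 == (sub_a_idx.length : Int) then (sub_span.length : Int) else PySem.List.pyGetD sub_a_idx (q.1 + 1) 0
          let act := PySem.List.pyGetD sub_span q.2 ""
          let act_slots := PySem.List.slice sub_span (some (q.2 + 1)) (some next_a_idx)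
          dd.insert act act_slots) domain_da
      dialog_act.insert domain domain_da') PySem.Dict.empty
  dialog_act.items.map (fun p => (p.1, p.2.items))

-- ===== PORT B =====
-- one step of B's single pass: state = (dialog_act, current domain, current act)
def pvBStep (all_domain : List String) (all_acts : List String)
    (st : PySem.Dict String (PySem.Dict String (List String)) × Option String × Option String)
    (token : String) :
    PySem.Dict String (PySem.Dict String (List String)) × Option String × Option String :=
  if all_domain.contains token || token == "[general]" then
    (st.1.setdefault token PySem.Dict.empty, some token, none)
  else if st.2.1.isSome && all_acts.contains token then
    let d := st.2.1.getD ""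
    (st.1.insert d ((st.1.getD d PySem.Dict.empty).insert token []), st.2.1, some token)
  else
    match st.2.2 with
    | some a =>
      let d := st.2.1.getD ""
      let dd := st.1.getD d PySem.Dict.empty
      -- dialog_act[cur_domain][cur_act].append(token) modelled as re-inserting the grown list
      (st.1.insert d (dd.insert a (dd.getD a [] ++ [token])), st.2.1, st.2.2)
    | none => st

def paser_aspn_to_dict_alt (sent : String) (all_domain : List String) (all_acts : List String) : List (String × List (String × List String)) :=
  let ts := PySem.Str.split₀ sent
  let fin := ts.foldl (pvBStep all_domain all_acts) (PySem.Dict.empty, none, none)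
  fin.1.items.map (fun p => (p.1, p.2.items))

-- ===== PRECONDITION & SPEC =====
def Spec_paser_aspn_to_dict (sent : String) (all_domain : List String) (all_acts : List String) (out : List (String × List (String × List String))) : Prop := out = paser_aspn_to_dict_alt sent all_domain all_acts
instance (sent : String) (all_domain : List String) (all_acts : List String) (out : List (String × List (String × List String))) : Decidable (Spec_paser_aspn_to_dict sent all_domain all_acts out) := by unfold Spec_paser_aspn_to_dict; infer_instance

-- ===== CLAIM (what is proved, stated in full; the proofs are below) =====
def Claim_equal_paser_aspn_to_dict : Prop := ∀ (sent : String) (all_domain : List String) (all_acts : List String), Dom_paser_aspn_to_dict sent all_domain all_acts → Spec_paser_aspn_to_dict sent all_domain all_acts (paser_aspn_to_dict sent all_domain all_acts)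

-- ===== LEMMAS AND PROOFS =====

theorem enumShift {α : Type} (xs : List α) (s : Int) : PySem.List.enumerate xs s = (PySem.List.enumerate xs 0).map (fun q => (q.1 + s, q.2)) := by
  induction xs generalizing s with
  | nil => simp [PySem.List.enumerate]
  | cons x t ih =>
    rw [PySem.List.enumerate_cons, PySem.List.enumerate_cons, ih (s+1), zero_add, ih 1]
    simp only [List.map_map, List.map_cons, zero_add]
    refine congrArg (List.cons _) (List.map_congr_left ?_)
    intro q _
    simp [Function.comp]
    omega
theorem enumZip {σ : Type} (I : List Int) (L : Int) (gf : σ → Int → Int → σ) (init : σ) :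
    (PySem.List.enumerate I).foldl (fun a p => gf a p.2 (if p.1 + 1 == (I.length : Int) then L else PySem.List.pyGetD I (p.1 + 1) 0)) init
    = (I.zip (I.drop 1 ++ [L])).foldl (fun a p => gf a p.1 p.2) init := by
  induction I generalizing init with
  | nil => simp [PySem.List.enumerate]
  | cons x xs ih =>
    rw [PySem.List.enumerate_cons, zero_add, enumShift xs 1]
    simp only [List.foldl_cons, List.foldl_map]
    refine Eq.trans (PySem.List.foldl_congr_mem _ _
      (fun (a : σ) (p : Int × Int) => gf a p.2 (if p.1 + 1 == ((xs.length : Int)) then L else PySem.List.pyGetD xs (p.1 + 1) 0)) _ ?_) ?_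
    · intro a q hq
      rw [PySem.List.mem_enumerate_iff] at hq
      obtain ⟨k, hk, rfl⟩ := hq
      simp only [zero_add]
      by_cases hke : (k : Int) + 1 = (xs.length : Int)
      · have h1 : ((k:Int) + 1 + 1 == ((x :: xs).length : Int)) = true := by simp; omega
        have h2 : ((k:Int) + 1 == (xs.length : Int)) = true := by simp; omega
        rw [h1, h2]
        simp
      · have h1 : ((k:Int) + 1 + 1 == ((x :: xs).length : Int)) = false := by simp; omega
        have h2 : ((k:Int) + 1 == (xs.length : Int)) = false := by simp; omega
        rw [h1, h2]
        simp only [Bool.false_eq_true, if_false]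
        have h0 : (k:Int) + 1 + 1 = ((k + 2 : Nat) : Int) := by push_cast; ring
        have h3 : (k:Int) + 1 = ((k + 1 : Nat) : Int) := by push_cast; ring
        rw [h0, h3, PySem.List.pyGetD_natCast, PySem.List.pyGetD_natCast]
        simp
    · rw [ih]
      cases xs with
      | nil => simp
      | cons y t =>
        have h1 : ((0:Int) + 1 == (((x :: y :: t).length) : Int)) = false := by simp; omega
        rw [h1]
        simp only [Bool.false_eq_true, if_false]
        have h0 : (0:Int) + 1 = ((1:Nat):Int) := by norm_num
        rw [h0, PySem.List.pyGetD_natCast]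
        simp

def pvSegs {α : Type} (p : α → Bool) : List α → List (α × List α)
  | [] => []
  | x :: t =>
    if p x then (x, t.takeWhile (fun y => !p y)) :: pvSegs p (t.dropWhile (fun y => !p y))
    else pvSegs p t
termination_by l => l.length
decreasing_by
  · simpa using Nat.lt_succ_of_le (List.length_dropWhile_le _ _)
  · simp

def pvIdxs {α : Type} (p : α → Bool) (ts : List α) : List Int :=
  ((PySem.List.enumerate ts 0).filter (fun q => p q.2)).map (fun q => q.1)

theorem pvIdxs_mem {α : Type} (p : α → Bool) (ts : List α) (i : Int) (h : i ∈ pvIdxs p ts) :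
    ∃ k : Nat, i = (k : Int) ∧ k < ts.length := by
  unfold pvIdxs at h
  obtain ⟨q, hq, rfl⟩ := List.mem_map.mp h
  have hq' := List.mem_of_mem_filter hq
  rw [PySem.List.mem_enumerate_iff] at hq'
  obtain ⟨k, hk, rfl⟩ := hq'
  exact ⟨k, by simp, hk⟩

theorem pvIdxs_append_neg {α : Type} (p : α → Bool) (pre ts : List α) (h : ∀ x ∈ pre, p x = false) :
    pvIdxs p (pre ++ ts) = (pvIdxs p ts).map (· + (pre.length : Int)) := by
  unfold pvIdxs
  rw [PySem.List.enumerate_append, List.filter_append]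
  have h1 : (PySem.List.enumerate pre 0).filter (fun q => p q.2) = [] := by
    rw [List.filter_eq_nil_iff]
    intro q hq
    rw [PySem.List.mem_enumerate_iff] at hq
    obtain ⟨k, hk, rfl⟩ := hq
    simp [h _ (List.getElem_mem hk)]
  rw [h1, List.nil_append, zero_add, enumShift ts (pre.length : Int), List.filter_map]
  simp only [List.map_map]
  rfl

theorem pvIdxs_cons_pos {α : Type} (p : α → Bool) (x : α) (ts : List α) (h : p x = true) :
    pvIdxs p (x :: ts) = 0 :: (pvIdxs p ts).map (· + 1) := by
  unfold pvIdxs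
  rw [PySem.List.enumerate_cons, zero_add, enumShift ts 1, List.filter_cons]
  simp only [h, if_pos, List.filter_map, List.map_cons, List.map_map]
  rfl

theorem mapAddAdd (J : List Int) (a b : Int) : (J.map (· + a)).map (· + b) = J.map (· + (a + b)) := by
  rw [List.map_map]
  apply List.map_congr_left
  intro q _
  simp [Function.comp]
  omega

theorem dropWhileHead {α : Type} (q : α → Bool) (l t : List α) (y : α) (h : l.dropWhile q = y :: t) : q y = false := by
  induction l with
  | nil => simp at h
  | cons x l ih =>
    rw [List.dropWhile_cons] at h
    split at h
    · exact ih h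
    · cases h
      simpa using ‹¬ q _ = true›

theorem offsetFold {σ α : Type} (p : α → Bool) (d0 : α) (gf : σ → α → List α → σ) (pre ts : List α) (init : σ) :
    (((pvIdxs p ts).map (· + (pre.length : Int))).zip
        ((((pvIdxs p ts).map (· + (pre.length : Int))).drop 1) ++ [((pre ++ ts).length : Int)])).foldl
      (fun a q => gf a (PySem.List.pyGetD (pre ++ ts) q.1 d0)
        (PySem.List.slice (pre ++ ts) (some (q.1 + 1)) (some q.2))) init
    = ((pvIdxs p ts).zip ((pvIdxs p ts).drop 1 ++ [(ts.length : Int)])).foldl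
      (fun a q => gf a (PySem.List.pyGetD ts q.1 d0)
        (PySem.List.slice ts (some (q.1 + 1)) (some q.2))) init := by
  have hL : ((pre ++ ts).length : Int) = (ts.length : Int) + (pre.length : Int) := by
    simp [List.length_append]; omega
  rw [hL, ← List.map_drop]
  have hmapapp : ((pvIdxs p ts).drop 1).map (· + (pre.length : Int)) ++ [(ts.length : Int) + (pre.length : Int)]
      = (((pvIdxs p ts).drop 1) ++ [(ts.length : Int)]).map (· + (pre.length : Int)) := by
    simp
  rw [hmapapp, List.zip_map, List.foldl_map]
  apply PySem.List.foldl_congr_mem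
  intro acc q hq
  obtain ⟨hq1, hq2⟩ := List.of_mem_zip hq
  obtain ⟨k, hk1, hk2⟩ := pvIdxs_mem p ts q.1 hq1
  have hq2' : ∃ m : Nat, q.2 = (m : Int) ∧ m ≤ ts.length := by
    rcases List.mem_append.mp hq2 with h | h
    · obtain ⟨m, hm1, hm2⟩ := pvIdxs_mem p ts q.2 (List.mem_of_mem_drop h)
      exact ⟨m, hm1, Nat.le_of_lt hm2⟩
    · exact ⟨ts.length, by simpa using h, Nat.le_refl _⟩
  obtain ⟨m, hm1, hm2⟩ := hq2'
  simp only [Prod.map_fst, Prod.map_snd, hk1, hm1]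
  have e1 : (k : Int) + (pre.length : Int) = ((pre.length + k : Nat) : Int) := by push_cast; ring
  have e2 : (k : Int) = ((k : Nat) : Int) := rfl
  have hget : PySem.List.pyGetD (pre ++ ts) ((k : Int) + (pre.length : Int)) d0 = PySem.List.pyGetD ts (k : Int) d0 := by
    rw [e1, PySem.List.pyGetD_natCast, PySem.List.pyGetD_natCast]
    simp [List.getD, List.getElem?_append_right (Nat.le_add_right pre.length k)]
  have e3 : (k : Int) + (pre.length : Int) + 1 = ((pre.length + (k + 1) : Nat) : Int) := by push_cast; ring
  have e4 : (m : Int) + (pre.length : Int) = ((pre.length + m : Nat) : Int) := by push_cast; ring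
  have e5 : (k : Int) + 1 = (((k + 1 : Nat)) : Int) := by push_cast; ring
  have hslice : PySem.List.slice (pre ++ ts) (some ((k : Int) + (pre.length : Int) + 1)) (some ((m : Int) + (pre.length : Int)))
      = PySem.List.slice ts (some ((k : Int) + 1)) (some (m : Int)) := by
    rw [e3, e4, e5, PySem.List.slice_natCast, PySem.List.slice_natCast]
    rw [List.drop_length_add_append]
    congr 1
    omega
  rw [hget, hslice]

theorem zipSegsAux {σ α : Type} (p : α → Bool) (d0 : α) (gf : σ → α → List α → σ) :
    ∀ (n : Nat) (ts : List α), ts.length ≤ n → ∀ (init : σ),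
    ((pvIdxs p ts).zip ((pvIdxs p ts).drop 1 ++ [(ts.length : Int)])).foldl
      (fun a q => gf a (PySem.List.pyGetD ts q.1 d0)
        (PySem.List.slice ts (some (q.1 + 1)) (some q.2))) init
    = (pvSegs p ts).foldl (fun a q => gf a q.1 q.2) init := by
  intro n
  induction n with
  | zero =>
    intro ts hts init
    have : ts = [] := List.eq_nil_of_length_eq_zero (Nat.le_zero.mp hts)
    subst this
    simp [pvIdxs, pvSegs, PySem.List.enumerate]
  | succ n ih =>
    intro ts hts init
    cases ts with
    | nil => simp [pvIdxs, pvSegs, PySem.List.enumerate]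
    | cons t rest =>
      by_cases hpt : p t = true
      · -- head is a p-token
        have hsplit : rest = rest.takeWhile (fun y => !p y) ++ rest.dropWhile (fun y => !p y) :=
          (List.takeWhile_append_dropWhile).symm
        set span := rest.takeWhile (fun y => !p y) with hspan_def
        set rest2 := rest.dropWhile (fun y => !p y) with hrest2_def
        have hspan : ∀ x ∈ span, p x = false := by
          intro x hx
          have := List.mem_takeWhile_imp hx
          simpa using this
        have hsegs : pvSegs p (t :: rest) = (t, span) :: pvSegs p rest2 := by
          rw [pvSegs]
          simp only [hpt, if_pos]
          exact congrArg₂ _ (by rw [hspan_def]) (by rw [hrest2_def])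
        have hidxrest : pvIdxs p rest = (pvIdxs p rest2).map (· + (span.length : Int)) := by
          conv_lhs => rw [hsplit]
          exact pvIdxs_append_neg p span rest2 hspan
        have hI : pvIdxs p (t :: rest) = 0 :: (pvIdxs p rest2).map (· + ((span.length : Int) + 1)) := by
          rw [pvIdxs_cons_pos p t rest hpt, hidxrest, mapAddAdd]
        have hgot_t : PySem.List.pyGetD (t :: rest) 0 d0 = t := by
          rw [show (0 : Int) = ((0 : Nat) : Int) from rfl, PySem.List.pyGetD_natCast]
          rfl
        cases hr2 : rest2 with
        | nil =>
          have hspanrest : span = rest := by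
            rw [hsplit, hr2, List.append_nil]
          rw [hr2, show pvIdxs p ([] : List α) = [] from rfl, List.map_nil] at hI
          rw [hI, hsegs, hr2]
          have hzip : ([(0 : Int)]).zip (List.drop 1 [(0 : Int)] ++ [(((t :: rest).length) : Int)])
              = [((0 : Int), (((t :: rest).length) : Int))] := rfl
          rw [hzip, List.foldl_cons, List.foldl_nil,
            show pvSegs p ([] : List α) = [] from by rw [pvSegs], List.foldl_cons, List.foldl_nil]
          show gf init (PySem.List.pyGetD (t :: rest) 0 d0)
              (PySem.List.slice (t :: rest) (some (0 + 1)) (some (((t :: rest).length) : Int))) = gf init t span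
          congr 1
          have e01 : (0 : Int) + 1 = ((1 : Nat) : Int) := by norm_num
          rw [e01, PySem.List.slice_natCast]
          simp [hspanrest]
        | cons y rest3 =>
          have hy : p y = true := by
            have hdw : rest.dropWhile (fun y => !p y) = y :: rest3 := by rw [← hrest2_def, hr2]
            have := dropWhileHead (fun y => !p y) rest rest3 y hdw
            simpa using this
          have hC : (span.length : Int) + 1 = (((t :: span).length) : Int) := by
            push_cast [List.length_cons]
            ring
          have hI2 : pvIdxs p rest2 = 0 :: (pvIdxs p rest3).map (· + 1) := by
            rw [hr2]; exact pvIdxs_cons_pos p y rest3 hy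
          have hImap : (pvIdxs p rest2).map (· + (((t :: span).length) : Int))
              = ((0 : Int) + (((t :: span).length) : Int)) :: (((pvIdxs p rest3).map (· + 1)).map (· + (((t :: span).length) : Int))) := by
            rw [hI2, List.map_cons]
          have hI' : pvIdxs p (t :: rest) = 0 :: (pvIdxs p rest2).map (· + (((t :: span).length) : Int)) := by
            rw [hI, hC]
          have htsplit : t :: rest = (t :: span) ++ rest2 := by rw [hsplit]; rfl
          rw [hI', hsegs, List.foldl_cons, hImap]
          have hzipc : ∀ (tl : List Int) (h2 L : Int),
              ((0 : Int) :: h2 :: tl).zip (List.drop 1 ((0 : Int) :: h2 :: tl) ++ [L])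
              = ((0 : Int), h2) :: ((h2 :: tl).zip (List.drop 1 (h2 :: tl) ++ [L])) := fun _ _ _ => rfl
          rw [hzipc, List.foldl_cons]
          have hstep1 : gf init (PySem.List.pyGetD (t :: rest) (0 : Int) d0)
              (PySem.List.slice (t :: rest) (some ((0 : Int) + 1)) (some ((0 : Int) + (((t :: span).length) : Int))))
              = gf init t span := by
            rw [hgot_t]
            congr 1
            have e01 : (0 : Int) + 1 = ((1 : Nat) : Int) := by norm_num
            have e0C : (0 : Int) + (((t :: span).length) : Int) = (((t :: span).length) : Int) := zero_add _
            rw [e01, e0C, PySem.List.slice_natCast]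
            have hdrop : (t :: rest).drop 1 = rest := rfl
            rw [hdrop, List.length_cons, Nat.add_sub_cancel, hsplit]
            exact List.take_left
          have hback : ((0 : Int) + (((t :: span).length) : Int)) :: (((pvIdxs p rest3).map (· + 1)).map (· + (((t :: span).length) : Int)))
              = (pvIdxs p rest2).map (· + (((t :: span).length) : Int)) := hImap.symm
          rw [hstep1, hback]
          have hlen2 : rest2.length ≤ n := by
            have h1 : rest2.length ≤ rest.length := by
              rw [hrest2_def]; exact List.length_dropWhile_le _ _
            have h2 : rest.length ≤ n := by simpa using Nat.le_of_succ_le_succ hts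
            omega
          calc List.foldl
                (fun a q => gf a (PySem.List.pyGetD (t :: rest) q.1 d0)
                  (PySem.List.slice (t :: rest) (some (q.1 + 1)) (some q.2))) (gf init t span)
                (((pvIdxs p rest2).map (· + (((t :: span).length) : Int))).zip
                  ((List.drop 1 ((pvIdxs p rest2).map (· + (((t :: span).length) : Int)))) ++ [(((t :: rest).length) : Int)]))
              = List.foldl
                (fun a q => gf a (PySem.List.pyGetD ((t :: span) ++ rest2) q.1 d0)
                  (PySem.List.slice ((t :: span) ++ rest2) (some (q.1 + 1)) (some q.2))) (gf init t span)
                (((pvIdxs p rest2).map (· + (((t :: span).length) : Int))).zip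
                  ((((pvIdxs p rest2).map (· + (((t :: span).length) : Int))).drop 1) ++ [((((t :: span) ++ rest2).length) : Int)])) := by
                rw [htsplit]
            _ = List.foldl
                (fun a q => gf a (PySem.List.pyGetD rest2 q.1 d0)
                  (PySem.List.slice rest2 (some (q.1 + 1)) (some q.2))) (gf init t span)
                ((pvIdxs p rest2).zip ((pvIdxs p rest2).drop 1 ++ [(rest2.length : Int)])) :=
                offsetFold p d0 gf (t :: span) rest2 (gf init t span)
            _ = (pvSegs p rest2).foldl (fun a q => gf a q.1 q.2) (gf init t span) :=
                ih rest2 hlen2 (gf init t span)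
      · -- head is not a p-token
        have hpt' : ∀ x ∈ [t], p x = false := by simpa using hpt
        have hcons : t :: rest = [t] ++ rest := rfl
        rw [hcons]
        have hsegs : pvSegs p ([t] ++ rest) = pvSegs p rest := by
          rw [List.singleton_append, pvSegs]
          simp [hpt]
        rw [pvIdxs_append_neg p [t] rest hpt', hsegs]
        have := offsetFold p d0 gf [t] rest init
        simp only [List.length_cons, List.length_nil] at this ⊢
        rw [this]
        exact ih rest (by simpa using Nat.le_of_succ_le_succ hts) init

theorem zipSegs {σ α : Type} (p : α → Bool) (d0 : α) (gf : σ → α → List α → σ) (ts : List α) (init : σ) :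
    ((pvIdxs p ts).zip ((pvIdxs p ts).drop 1 ++ [(ts.length : Int)])).foldl
      (fun a q => gf a (PySem.List.pyGetD ts q.1 d0)
        (PySem.List.slice ts (some (q.1 + 1)) (some q.2))) init
    = (pvSegs p ts).foldl (fun a q => gf a q.1 q.2) init :=
  zipSegsAux p d0 gf ts.length ts (Nat.le_refl _) init

set_option maxHeartbeats 2000000 in
theorem A_dict_char (ts all_domain all_acts : List String) :
    (PySem.List.enumerate (((PySem.List.enumerate ts).filter (fun p => (all_domain ++ ["[general]"]).contains p.2)).map (fun p => p.1))).foldl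
      (fun (dialog_act : PySem.Dict String (PySem.Dict String (List String))) p =>
        let next_d_idx : Int := if p.1 + 1 == ((((PySem.List.enumerate ts).filter (fun p => (all_domain ++ ["[general]"]).contains p.2)).map (fun p => p.1)).length : Int) then (ts.length : Int) else PySem.List.pyGetD (((PySem.List.enumerate ts).filter (fun p => (all_domain ++ ["[general]"]).contains p.2)).map (fun p => p.1)) (p.1 + 1) 0
        let domain := PySem.List.pyGetD ts p.2 ""
        let domain_da := dialog_act.getD domain PySem.Dict.empty
        let sub_span := PySem.List.slice ts (some (p.2 + 1)) (some next_d_idx)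
        let sub_a_idx := ((PySem.List.enumerate sub_span).filter (fun q => all_acts.contains q.2)).map (fun q => q.1)
        let domain_da' := (PySem.List.enumerate sub_a_idx).foldl
          (fun (dd : PySem.Dict String (List String)) q =>
            let next_a_idx : Int := if q.1 + 1 == (sub_a_idx.length : Int) then (sub_span.length : Int) else PySem.List.pyGetD sub_a_idx (q.1 + 1) 0
            let act := PySem.List.pyGetD sub_span q.2 ""
            let act_slots := PySem.List.slice sub_span (some (q.2 + 1)) (some next_a_idx)
            dd.insert act act_slots) domain_da
        dialog_act.insert domain domain_da') PySem.Dict.empty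
    = (pvSegs (fun t => (all_domain ++ ["[general]"]).contains t) ts).foldl
        (fun da q => da.insert q.1
          ((pvSegs (fun t => all_acts.contains t) q.2).foldl (fun dd r => dd.insert r.1 r.2)
            (da.getD q.1 PySem.Dict.empty))) PySem.Dict.empty := by
  have inner : ∀ (sub : List String) (dd0 : PySem.Dict String (List String)),
      (PySem.List.enumerate (((PySem.List.enumerate sub).filter (fun q => all_acts.contains q.2)).map (fun q => q.1))).foldl
        (fun (dd : PySem.Dict String (List String)) q =>
          let next_a_idx : Int := if q.1 + 1 == ((((PySem.List.enumerate sub).filter (fun q => all_acts.contains q.2)).map (fun q => q.1)).length : Int) then (sub.length : Int) else PySem.List.pyGetD (((PySem.List.enumerate sub).filter (fun q => all_acts.contains q.2)).map (fun q => q.1)) (q.1 + 1) 0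
          let act := PySem.List.pyGetD sub q.2 ""
          let act_slots := PySem.List.slice sub (some (q.2 + 1)) (some next_a_idx)
          dd.insert act act_slots) dd0
      = (pvSegs (fun t => all_acts.contains t) sub).foldl (fun dd r => dd.insert r.1 r.2) dd0 := by
    intro sub dd0
    refine Eq.trans (enumZip (((PySem.List.enumerate sub).filter (fun q => all_acts.contains q.2)).map (fun q => q.1)) ((sub.length : Int))
      (fun (dd : PySem.Dict String (List String)) a_idx next_a_idx => dd.insert (PySem.List.pyGetD sub a_idx "") (PySem.List.slice sub (some (a_idx + 1)) (some next_a_idx))) dd0) ?_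
    exact zipSegs (fun t => all_acts.contains t) "" (fun (dd : PySem.Dict String (List String)) act slots => dd.insert act slots) sub dd0
  refine Eq.trans (enumZip (((PySem.List.enumerate ts).filter (fun p => (all_domain ++ ["[general]"]).contains p.2)).map (fun p => p.1)) ((ts.length : Int))
    (fun (dialog_act : PySem.Dict String (PySem.Dict String (List String))) d_idx next_d_idx =>
      let domain := PySem.List.pyGetD ts d_idx ""
      let domain_da := dialog_act.getD domain PySem.Dict.empty
      let sub_span := PySem.List.slice ts (some (d_idx + 1)) (some next_d_idx)
      let sub_a_idx := ((PySem.List.enumerate sub_span).filter (fun q => all_acts.contains q.2)).map (fun q => q.1)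
      let domain_da' := (PySem.List.enumerate sub_a_idx).foldl
        (fun (dd : PySem.Dict String (List String)) q =>
          let next_a_idx : Int := if q.1 + 1 == (sub_a_idx.length : Int) then (sub_span.length : Int) else PySem.List.pyGetD sub_a_idx (q.1 + 1) 0
          let act := PySem.List.pyGetD sub_span q.2 ""
          let act_slots := PySem.List.slice sub_span (some (q.2 + 1)) (some next_a_idx)
          dd.insert act act_slots) domain_da
      dialog_act.insert domain domain_da') PySem.Dict.empty) ?_
  refine Eq.trans (zipSegs (fun t => (all_domain ++ ["[general]"]).contains t) ""
    (fun (da : PySem.Dict String (PySem.Dict String (List String))) domain sub_span =>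
      da.insert domain
        ((PySem.List.enumerate (((PySem.List.enumerate sub_span).filter (fun q => all_acts.contains q.2)).map (fun q => q.1))).foldl
          (fun (dd : PySem.Dict String (List String)) q =>
            let next_a_idx : Int := if q.1 + 1 == ((((PySem.List.enumerate sub_span).filter (fun q => all_acts.contains q.2)).map (fun q => q.1)).length : Int) then (sub_span.length : Int) else PySem.List.pyGetD (((PySem.List.enumerate sub_span).filter (fun q => all_acts.contains q.2)).map (fun q => q.1)) (q.1 + 1) 0
            let act := PySem.List.pyGetD sub_span q.2 ""
            let act_slots := PySem.List.slice sub_span (some (q.2 + 1)) (some next_a_idx)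
            dd.insert act act_slots) (da.getD domain PySem.Dict.empty)))
    ts PySem.Dict.empty) ?_
  apply PySem.List.foldl_congr_mem
  intro acc q _
  exact congrArg (acc.insert q.1) (inner q.2 (acc.getD q.1 PySem.Dict.empty))

theorem A_char (sent : String) (all_domain all_acts : List String) :
    paser_aspn_to_dict sent all_domain all_acts
    = ((pvSegs (fun t => (all_domain ++ ["[general]"]).contains t) (PySem.Str.split₀ sent)).foldl
        (fun da q => da.insert q.1
          ((pvSegs (fun t => all_acts.contains t) q.2).foldl (fun dd r => dd.insert r.1 r.2)
            (da.getD q.1 PySem.Dict.empty))) PySem.Dict.empty).items.map (fun p => (p.1, p.2.items)) := by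
  exact congrArg (fun (d : PySem.Dict String (PySem.Dict String (List String))) => d.items.map (fun p => (p.1, p.2.items)))
    (A_dict_char (PySem.Str.split₀ sent) all_domain all_acts)

theorem segsAppendNeg {α : Type} (p : α → Bool) (pre l : List α) (h : ∀ x ∈ pre, p x = false) :
    pvSegs p (pre ++ l) = pvSegs p l := by
  induction pre with
  | nil => rfl
  | cons x pre ih =>
    rw [List.cons_append, pvSegs]
    simp only [h x (by simp), Bool.false_eq_true, if_false]
    exact ih (fun z hz => h z (by simp [hz]))


theorem pd_eq (all_domain : List String) (t : String) :
    (all_domain ++ ["[general]"]).contains t = (all_domain.contains t || t == "[general]") := by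
  rw [List.contains_append]
  simp [beq_eq_decide]

theorem bAppendSlots (all_domain all_acts : List String) :
    ∀ (slots : List String),
    (∀ x ∈ slots, (all_domain ++ ["[general]"]).contains x = false ∧ all_acts.contains x = false) →
    ∀ (cur : List String) (da : PySem.Dict String (PySem.Dict String (List String))) (d a : String)
      (dd : PySem.Dict String (List String)),
    slots.foldl (pvBStep all_domain all_acts) (da.insert d (dd.insert a cur), some d, some a)
    = (da.insert d (dd.insert a (cur ++ slots)), some d, some a) := by
  intro slots
  induction slots with
  | nil => intro _ cur da d a dd; simp
  | cons tkn rest ih =>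
    intro h cur da d a dd
    obtain ⟨hd, ha⟩ := h tkn (by simp)
    have hd' : (all_domain.contains tkn || tkn == "[general]") = false := by
      rw [← pd_eq]; exact hd
    rw [List.foldl_cons]
    have hstep : pvBStep all_domain all_acts (da.insert d (dd.insert a cur), some d, some a) tkn
        = (da.insert d (dd.insert a (cur ++ [tkn])), some d, some a) := by
      unfold pvBStep
      rw [hd']
      simp only [Bool.false_eq_true, if_false, Option.isSome_some, Bool.true_and, ha]
      simp only [PySem.Dict.getD_insert_self, PySem.Dict.insert_insert_self, Option.getD_some]
    rw [hstep, ih (fun z hz => h z (by simp [hz])) (cur ++ [tkn]) da d a dd, List.append_assoc]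
    rfl

theorem bInnerSkip (all_domain all_acts : List String) :
    ∀ (pre : List String),
    (∀ x ∈ pre, (all_domain ++ ["[general]"]).contains x = false ∧ all_acts.contains x = false) →
    ∀ (da : PySem.Dict String (PySem.Dict String (List String))) (d : String),
    pre.foldl (pvBStep all_domain all_acts) (da, some d, none) = (da, some d, none) := by
  intro pre
  induction pre with
  | nil => intro _ da d; rfl
  | cons tkn rest ih =>
    intro h da d
    obtain ⟨hd, ha⟩ := h tkn (by simp)
    have hd' : (all_domain.contains tkn || tkn == "[general]") = false := by
      rw [← pd_eq]; exact hd
    rw [List.foldl_cons]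
    have hstep : pvBStep all_domain all_acts (da, some d, none) tkn = (da, some d, none) := by
      unfold pvBStep
      rw [hd']
      simp only [Bool.false_eq_true, if_false, Option.isSome_some, Bool.true_and, ha]
    rw [hstep]
    exact ih (fun z hz => h z (by simp [hz])) da d

theorem bHoist (d : String) :
    ∀ (L : List (String × List String)) (da : PySem.Dict String (PySem.Dict String (List String)))
      (X : PySem.Dict String (List String)),
    L.foldl (fun da' r => da'.insert d ((da'.getD d PySem.Dict.empty).insert r.1 r.2)) (da.insert d X)
    = da.insert d (L.foldl (fun dd r => dd.insert r.1 r.2) X) := by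
  intro L
  induction L with
  | nil => intro da X; rfl
  | cons r L ih =>
    intro da X
    rw [List.foldl_cons, List.foldl_cons, PySem.Dict.getD_insert_self, PySem.Dict.insert_insert_self]
    exact ih da (X.insert r.1 r.2)

theorem bInnerMain (all_domain all_acts : List String) :
    ∀ (n : Nat) (span : List String), span.length ≤ n →
    (∀ x ∈ span, (all_domain ++ ["[general]"]).contains x = false) →
    (span = [] ∨ ∃ y t, span = y :: t ∧ all_acts.contains y = true) →
    ∀ (da : PySem.Dict String (PySem.Dict String (List String))) (d : String) (ca : Option String),
    ∃ ca', span.foldl (pvBStep all_domain all_acts) (da, some d, ca)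
      = ((pvSegs (fun t => all_acts.contains t) span).foldl
          (fun da' r => da'.insert d ((da'.getD d PySem.Dict.empty).insert r.1 r.2)) da, some d, ca') := by
  intro n
  induction n with
  | zero =>
    intro span hlen _ _ da d ca
    have : span = [] := List.eq_nil_of_length_eq_zero (Nat.le_zero.mp hlen)
    subst this
    exact ⟨ca, by rw [pvSegs]; rfl⟩
  | succ n ih =>
    intro span hlen hdom hshape da d ca
    rcases hshape with rfl | ⟨y, t, rfl, hy⟩
    · exact ⟨ca, by rw [pvSegs]; rfl⟩
    · have hdy : (all_domain.contains y || y == "[general]") = false := by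
        rw [← pd_eq]; exact hdom y (by simp)
      have hstep : pvBStep all_domain all_acts (da, some d, ca) y
          = (da.insert d ((da.getD d PySem.Dict.empty).insert y []), some d, some y) := by
        unfold pvBStep
        rw [hdy]
        simp only [Bool.false_eq_true, if_false, Option.isSome_some, Bool.true_and, hy, if_pos]
        rfl
      rw [List.foldl_cons, hstep]
      have hsplit : t = t.takeWhile (fun z => !all_acts.contains z) ++ t.dropWhile (fun z => !all_acts.contains z) :=
        (List.takeWhile_append_dropWhile).symm
      set slots := t.takeWhile (fun z => !all_acts.contains z) with hslots_def
      set t2 := t.dropWhile (fun z => !all_acts.contains z) with ht2_def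
      have hslots : ∀ x ∈ slots, (all_domain ++ ["[general]"]).contains x = false ∧ all_acts.contains x = false := by
        intro x hx
        refine ⟨hdom x (by rw [hsplit]; exact List.mem_cons_of_mem y (List.mem_append_left _ hx)), ?_⟩
        have := List.mem_takeWhile_imp hx
        simpa using this
      have hsegs : pvSegs (fun z => all_acts.contains z) (y :: t)
          = (y, slots) :: pvSegs (fun z => all_acts.contains z) t2 := by
        rw [pvSegs]
        simp only [hy, if_pos]
        exact congrArg₂ _ (by rw [hslots_def]) (by rw [ht2_def])
      have happ := bAppendSlots all_domain all_acts slots hslots [] da d y (da.getD d PySem.Dict.empty)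
      rw [List.nil_append] at happ
      have h1 : t.foldl (pvBStep all_domain all_acts)
            (da.insert d ((da.getD d PySem.Dict.empty).insert y []), some d, some y)
          = t2.foldl (pvBStep all_domain all_acts)
            (da.insert d ((da.getD d PySem.Dict.empty).insert y slots), some d, some y) := by
        conv_lhs => rw [hsplit]
        rw [List.foldl_append, happ]
      cases ht2 : t2 with
      | nil =>
        refine ⟨some y, ?_⟩
        rw [h1, ht2, List.foldl_nil, hsegs, ht2, List.foldl_cons,
          show pvSegs (fun z => all_acts.contains z) ([] : List String) = [] from by rw [pvSegs],
          List.foldl_nil]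
      | cons z t3 =>
        have hz : all_acts.contains z = true := by
          have hdw : t.dropWhile (fun z => !all_acts.contains z) = z :: t3 := by rw [← ht2_def, ht2]
          have := dropWhileHead _ t t3 z hdw
          simpa using this
        have hlen2 : t2.length ≤ n := by
          have hl1 : t2.length ≤ t.length := by rw [ht2_def]; exact List.length_dropWhile_le _ _
          have hl2 : (y :: t).length ≤ n + 1 := hlen
          simp only [List.length_cons] at hl2
          omega
        have hdom2 : ∀ x ∈ t2, (all_domain ++ ["[general]"]).contains x = false := by
          intro x hx
          exact hdom x (by rw [hsplit]; exact List.mem_cons_of_mem y (List.mem_append_right _ hx))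
        obtain ⟨ca', hca⟩ := ih t2 hlen2 hdom2 (Or.inr ⟨z, t3, ht2, hz⟩)
          (da.insert d ((da.getD d PySem.Dict.empty).insert y slots)) d (some y)
        refine ⟨ca', ?_⟩
        rw [h1, hca, hsegs, List.foldl_cons]
theorem dictInsertGetDSelf {V : Type} (dd : PySem.Dict String V) (k : String) (v0 : V)
    (hnd : dd.keys.Nodup) (hc : dd.contains k = true) : dd.insert k (dd.getD k v0) = dd := by
  apply PySem.Dict.ext
  rw [PySem.Dict.items_insert_of_contains]
  have : ∀ p ∈ dd.items, (if p.1 == k then (k, dd.getD k v0) else p) = p := by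
    intro p hp
    by_cases hpk : p.1 = k
    · have hp' : (k, p.2) ∈ dd.items := by rw [← hpk]; simpa using hp
      have hv : dd.getD k v0 = p.2 := PySem.Dict.getD_of_mem_items dd hp' hnd v0
      simp [hpk, hv, Prod.ext_iff]
    · simp [hpk]
  rw [List.map_congr_left this, List.map_id']
  exact hc

theorem bCollapse (d : String) (L : List (String × List String))
    (da : PySem.Dict String (PySem.Dict String (List String))) (hnd : da.keys.Nodup) :
    L.foldl (fun da' r => da'.insert d ((da'.getD d PySem.Dict.empty).insert r.1 r.2)) (da.setdefault d PySem.Dict.empty)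
    = da.insert d (L.foldl (fun dd r => dd.insert r.1 r.2) (da.getD d PySem.Dict.empty)) := by
  by_cases hc : da.contains d = true
  · rw [PySem.Dict.setdefault_of_contains da PySem.Dict.empty hc]
    have hh := bHoist d L da (da.getD d PySem.Dict.empty)
    rw [dictInsertGetDSelf da d PySem.Dict.empty hnd hc] at hh
    exact hh
  · have hc' : da.contains d = false := by simpa using hc
    rw [PySem.Dict.setdefault_of_not_contains da PySem.Dict.empty hc',
      PySem.Dict.getD_of_not_contains da PySem.Dict.empty hc']
    exact bHoist d L da PySem.Dict.empty

theorem bSkip (all_domain all_acts : List String) :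
    ∀ (pre : List String),
    (∀ x ∈ pre, (all_domain ++ ["[general]"]).contains x = false) →
    ∀ (da : PySem.Dict String (PySem.Dict String (List String))),
    pre.foldl (pvBStep all_domain all_acts) (da, none, none) = (da, none, none) := by
  intro pre
  induction pre with
  | nil => intro _ da; rfl
  | cons tkn rest ih =>
    intro h da
    have hd' : (all_domain.contains tkn || tkn == "[general]") = false := by
      rw [← pd_eq]; exact h tkn (by simp)
    rw [List.foldl_cons]
    have hstep : pvBStep all_domain all_acts (da, none, none) tkn = (da, none, none) := by
      unfold pvBStep
      rw [hd']
      simp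
    rw [hstep]
    exact ih (fun z hz => h z (by simp [hz])) da

theorem bOuter (all_domain all_acts : List String) :
    ∀ (n : Nat) (ts : List String), ts.length ≤ n →
    (ts = [] ∨ ∃ d t, ts = d :: t ∧ (all_domain ++ ["[general]"]).contains d = true) →
    ∀ (da : PySem.Dict String (PySem.Dict String (List String))) (cd ca : Option String),
    da.keys.Nodup →
    (ts.foldl (pvBStep all_domain all_acts) (da, cd, ca)).1
    = (pvSegs (fun t => (all_domain ++ ["[general]"]).contains t) ts).foldl
        (fun da' q => da'.insert q.1
          ((pvSegs (fun t => all_acts.contains t) q.2).foldl (fun dd r => dd.insert r.1 r.2)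
            (da'.getD q.1 PySem.Dict.empty))) da := by
  intro n
  induction n with
  | zero =>
    intro ts hlen _ da cd ca _
    have : ts = [] := List.eq_nil_of_length_eq_zero (Nat.le_zero.mp hlen)
    subst this
    rw [pvSegs]
    rfl
  | succ n ih =>
    intro ts hlen hshape da cd ca hnd
    rcases hshape with rfl | ⟨d, t, rfl, hd⟩
    · rw [pvSegs]; rfl
    · have hd' : (all_domain.contains d || d == "[general]") = true := by
        rw [← pd_eq]; exact hd
      have hstep : pvBStep all_domain all_acts (da, cd, ca) d
          = (da.setdefault d PySem.Dict.empty, some d, none) := by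
        unfold pvBStep
        rw [hd']
        rfl
      rw [List.foldl_cons, hstep]
      have hsplit : t = t.takeWhile (fun z => !(all_domain ++ ["[general]"]).contains z)
          ++ t.dropWhile (fun z => !(all_domain ++ ["[general]"]).contains z) :=
        (List.takeWhile_append_dropWhile).symm
      set span := t.takeWhile (fun z => !(all_domain ++ ["[general]"]).contains z) with hspan_def
      set rest2 := t.dropWhile (fun z => !(all_domain ++ ["[general]"]).contains z) with hrest2_def
      have hspan : ∀ x ∈ span, (all_domain ++ ["[general]"]).contains x = false := by
        intro x hx
        have := List.mem_takeWhile_imp hx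
        simpa using this
      have hsegs : pvSegs (fun z => (all_domain ++ ["[general]"]).contains z) (d :: t)
          = (d, span) :: pvSegs (fun z => (all_domain ++ ["[general]"]).contains z) rest2 := by
        rw [pvSegs]
        simp only [hd, if_pos]
        exact congrArg₂ _ (by rw [hspan_def]) (by rw [hrest2_def])
      -- span: skip the non-act prefix, then process act segments
      have hspsplit : span = span.takeWhile (fun z => !all_acts.contains z)
          ++ span.dropWhile (fun z => !all_acts.contains z) :=
        (List.takeWhile_append_dropWhile).symm
      set sp1 := span.takeWhile (fun z => !all_acts.contains z) with hsp1_def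
      set sp2 := span.dropWhile (fun z => !all_acts.contains z) with hsp2_def
      have hsp1 : ∀ x ∈ sp1, (all_domain ++ ["[general]"]).contains x = false ∧ all_acts.contains x = false := by
        intro x hx
        have hxs : x ∈ span := by rw [hspsplit]; exact List.mem_append_left _ hx
        refine ⟨hspan x hxs, ?_⟩
        have := List.mem_takeWhile_imp hx
        simpa using this
      have hsp2dom : ∀ x ∈ sp2, (all_domain ++ ["[general]"]).contains x = false := by
        intro x hx
        exact hspan x (by rw [hspsplit]; exact List.mem_append_right _ hx)
      have hsp2shape : sp2 = [] ∨ ∃ y t', sp2 = y :: t' ∧ all_acts.contains y = true := by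
        cases hsp2 : sp2 with
        | nil => exact Or.inl rfl
        | cons y t' =>
          refine Or.inr ⟨y, t', rfl, ?_⟩
          have hdw : span.dropWhile (fun z => !all_acts.contains z) = y :: t' := by rw [← hsp2_def, hsp2]
          have := dropWhileHead _ span t' y hdw
          simpa using this
      obtain ⟨ca', hca⟩ := bInnerMain all_domain all_acts sp2.length sp2 (Nat.le_refl _) hsp2dom hsp2shape
        (da.setdefault d PySem.Dict.empty) d none
      have hsegsSpan : pvSegs (fun z => all_acts.contains z) span = pvSegs (fun z => all_acts.contains z) sp2 := by
        conv_lhs => rw [hspsplit]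
        exact segsAppendNeg _ sp1 sp2 (fun x hx => (hsp1 x hx).2)
      have hspanFold : span.foldl (pvBStep all_domain all_acts) (da.setdefault d PySem.Dict.empty, some d, none)
          = (da.insert d ((pvSegs (fun z => all_acts.contains z) span).foldl
              (fun dd r => dd.insert r.1 r.2) (da.getD d PySem.Dict.empty)), some d, ca') := by
        conv_lhs => rw [hspsplit]
        rw [List.foldl_append, bInnerSkip all_domain all_acts sp1 hsp1 (da.setdefault d PySem.Dict.empty) d, hca,
          bCollapse d _ da hnd, hsegsSpan]
      have hrest2shape : rest2 = [] ∨ ∃ z t3, rest2 = z :: t3 ∧ (all_domain ++ ["[general]"]).contains z = true := by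
        cases hr2 : rest2 with
        | nil => exact Or.inl rfl
        | cons z t3 =>
          refine Or.inr ⟨z, t3, rfl, ?_⟩
          have hdw : t.dropWhile (fun z => !(all_domain ++ ["[general]"]).contains z) = z :: t3 := by
            rw [← hrest2_def, hr2]
          have := dropWhileHead _ t t3 z hdw
          cases hzz : (all_domain ++ ["[general]"]).contains z with
          | true => rfl
          | false => rw [hzz] at this; simp at this
      have hlen2 : rest2.length ≤ n := by
        have hl1 : rest2.length ≤ t.length := by rw [hrest2_def]; exact List.length_dropWhile_le _ _
        simp only [List.length_cons] at hlen
        omega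
      conv_lhs => rw [hsplit]
      rw [List.foldl_append, hspanFold, hsegs, List.foldl_cons]
      exact ih rest2 hlen2 hrest2shape _ (some d) ca' (PySem.Dict.nodup_keys_insert _ _ _ hnd)

theorem B_dict_char (all_domain all_acts : List String) (ts : List String) :
    (ts.foldl (pvBStep all_domain all_acts) (PySem.Dict.empty, none, none)).1
    = (pvSegs (fun t => (all_domain ++ ["[general]"]).contains t) ts).foldl
        (fun da q => da.insert q.1
          ((pvSegs (fun t => all_acts.contains t) q.2).foldl (fun dd r => dd.insert r.1 r.2)
            (da.getD q.1 PySem.Dict.empty))) PySem.Dict.empty := by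
  have hsplit : ts = ts.takeWhile (fun z => !(all_domain ++ ["[general]"]).contains z)
      ++ ts.dropWhile (fun z => !(all_domain ++ ["[general]"]).contains z) :=
    (List.takeWhile_append_dropWhile).symm
  set pre := ts.takeWhile (fun z => !(all_domain ++ ["[general]"]).contains z) with hpre_def
  set core := ts.dropWhile (fun z => !(all_domain ++ ["[general]"]).contains z) with hcore_def
  have hpre : ∀ x ∈ pre, (all_domain ++ ["[general]"]).contains x = false := by
    intro x hx
    have := List.mem_takeWhile_imp hx
    simpa using this
  have hshape : core = [] ∨ ∃ d t, core = d :: t ∧ (all_domain ++ ["[general]"]).contains d = true := by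
    cases hc : core with
    | nil => exact Or.inl rfl
    | cons d t =>
      refine Or.inr ⟨d, t, rfl, ?_⟩
      have hdw : ts.dropWhile (fun z => !(all_domain ++ ["[general]"]).contains z) = d :: t := by
        rw [← hcore_def, hc]
      have := dropWhileHead _ ts t d hdw
      cases hzz : (all_domain ++ ["[general]"]).contains d with
      | true => rfl
      | false => rw [hzz] at this; simp at this
  have hsegsts : pvSegs (fun t => (all_domain ++ ["[general]"]).contains t) ts
      = pvSegs (fun t => (all_domain ++ ["[general]"]).contains t) core := by
    conv_lhs => rw [hsplit]
    exact segsAppendNeg _ pre core hpre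
  conv_lhs => rw [hsplit]
  rw [List.foldl_append, bSkip all_domain all_acts pre hpre PySem.Dict.empty, hsegsts]
  exact bOuter all_domain all_acts core.length core (Nat.le_refl _) hshape
    PySem.Dict.empty none none PySem.Dict.nodup_keys_empty


theorem B_char (sent : String) (all_domain all_acts : List String) :
    paser_aspn_to_dict_alt sent all_domain all_acts
    = ((pvSegs (fun t => (all_domain ++ ["[general]"]).contains t) (PySem.Str.split₀ sent)).foldl
        (fun da q => da.insert q.1
          ((pvSegs (fun t => all_acts.contains t) q.2).foldl (fun dd r => dd.insert r.1 r.2)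
            (da.getD q.1 PySem.Dict.empty))) PySem.Dict.empty).items.map (fun p => (p.1, p.2.items)) := by
  exact congrArg (fun (d : PySem.Dict String (PySem.Dict String (List String))) => d.items.map (fun p => (p.1, p.2.items)))
    (B_dict_char all_domain all_acts (PySem.Str.split₀ sent))

-- ===== VERDICT (by name: the statement is the Claim_ definition above) =====
theorem paser_aspn_to_dict_spec : Claim_equal_paser_aspn_to_dict := by
  intro sent all_domain all_acts _
  unfold Spec_paser_aspn_to_dict
  rw [A_char, B_char]
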